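-- pv_equiv track=rewrite | github.com/ttlabtuat/sleep_satelight_ftc | dataset_utils.py | assign_nights
-- ===== SOURCE A (Python) =====
-- def assign_nights(num_subjects: int, onenight_subs: list[int]) -> dict[int, list[int]]:
--     """
--     Create a mapping from subject index to 1- or 2-night PSG indices.
--
--     Parameters
--     ----------
--     num_subjects : int
--         Number of subjects in the dataset.
--     onenight_subs : list[int]
--         List of subject indices that have only one night of PSG.
--
--     Returns
--     -------
--     dict[int, list[int]]
--         A dictionary mapping each subject index to a list of night indices.
--     """
--     assignments: dict[int, list[int]] = {}
--     current_value = 0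
--     for i in range(num_subjects):
--         if i in onenight_subs:
--             assignments[i] = [current_value]
--             current_value += 1
--         else:
--             assignments[i] = [current_value, current_value + 1]
--             current_value += 2
--     return assignments
-- ===== SOURCE B (Python) =====
-- def assign_nights(num_subjects: int, onenight_subs: list[int]) -> dict[int, list[int]]:
--     # Two-pass decomposition: per-subject width table, then prefix-sum offsets, then build.
--     widths = [1 if i in onenight_subs else 2 for i in range(num_subjects)]
--     starts = [0]
--     for w in widths:
--         starts.append(starts[-1] + w)
--     return {i: list(range(starts[i], starts[i] + widths[i])) for i in range(num_subjects)}
-- ===== Notes on version B (the rewrite author's own statement) =====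
-- stated objective: alternative
-- what changed: Replaces the single loop that threads a running counter through dict insertions with a two-pass decomposition: a per-subject width table, a prefix-sum offset table, then a second pass building each subject's range from the tables.
import Mathlib
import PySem

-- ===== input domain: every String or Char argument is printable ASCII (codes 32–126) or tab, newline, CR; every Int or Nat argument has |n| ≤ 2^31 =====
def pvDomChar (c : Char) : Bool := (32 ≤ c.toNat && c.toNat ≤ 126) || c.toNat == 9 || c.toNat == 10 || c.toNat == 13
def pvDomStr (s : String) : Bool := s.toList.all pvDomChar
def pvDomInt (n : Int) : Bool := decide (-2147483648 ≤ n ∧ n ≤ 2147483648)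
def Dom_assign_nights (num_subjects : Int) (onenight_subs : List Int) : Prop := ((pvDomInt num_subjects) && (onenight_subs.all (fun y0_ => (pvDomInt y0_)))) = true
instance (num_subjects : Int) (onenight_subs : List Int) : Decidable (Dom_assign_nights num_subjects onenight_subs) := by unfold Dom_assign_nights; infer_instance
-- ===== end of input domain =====

-- ===== PORT A =====
-- A: single loop threading a running counter through a dict.
def assign_nights (num_subjects : Int) (onenight_subs : List Int) : List (Int × List Int) :=
  let r := (PySem.List.pyRange 0 num_subjects 1).foldl
    (fun (st : PySem.Dict Int (List Int) × Int) i =>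
      if i ∈ onenight_subs then (st.1.insert i [st.2], st.2 + 1)
      else (st.1.insert i [st.2, st.2 + 1], st.2 + 2))
    (PySem.Dict.empty, 0)
  r.1.items

-- ===== PORT B =====
-- B: width table, prefix-sum offset table, then a second pass builds each range.
def assign_nights_alt (num_subjects : Int) (onenight_subs : List Int) : List (Int × List Int) :=
  let widths := (PySem.List.pyRange 0 num_subjects 1).map
    (fun i => if i ∈ onenight_subs then (1 : Int) else 2)
  let starts := widths.foldl
    (fun acc w => acc ++ [PySem.List.pyGetD acc (-1) 0 + w]) [(0 : Int)]
  (PySem.List.pyRange 0 num_subjects 1).map (fun i =>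
    (i, PySem.List.pyRange (PySem.List.pyGetD starts i 0)
          (PySem.List.pyGetD starts i 0 + PySem.List.pyGetD widths i 0) 1))

-- ===== PRECONDITION & SPEC =====
def Spec_assign_nights (num_subjects : Int) (onenight_subs : List Int) (out : List (Int × List Int)) : Prop := out = assign_nights_alt num_subjects onenight_subs
instance (num_subjects : Int) (onenight_subs : List Int) (out : List (Int × List Int)) : Decidable (Spec_assign_nights num_subjects onenight_subs out) := by unfold Spec_assign_nights; infer_instance

-- ===== CLAIM (what is proved, stated in full; the proofs are below) =====
def Claim_equal_assign_nights : Prop := ∀ (num_subjects : Int) (onenight_subs : List Int), Dom_assign_nights num_subjects onenight_subs → Spec_assign_nights num_subjects onenight_subs (assign_nights num_subjects onenight_subs)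

-- ===== LEMMAS AND PROOFS =====

-- width of subject i
def anW (subs : List Int) (i : Int) : Int := if i ∈ subs then 1 else 2

-- start offset of subject i (sum of the widths of all earlier subjects)
def anS (subs : List Int) (m : Int) : Int := ((PySem.List.pyRange 0 m 1).map (anW subs)).sum

-- common closed form of both outputs
def anSpec (subs : List Int) (n : Int) : List (Int × List Int) :=
  (PySem.List.pyRange 0 n 1).map
    (fun i => (i, PySem.List.pyRange (anS subs i) (anS subs i + anW subs i) 1))

-- prefix sums, the contents of B's `starts` table
def prefixSums (s : Int) : List Int → List Int
  | [] => [s]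
  | w :: ws => s :: prefixSums (s + w) ws

lemma anS_succ (subs : List Int) (m : Int) (h : 0 ≤ m) :
    anS subs (m + 1) = anS subs m + anW subs m := by
  unfold anS
  rw [PySem.List.pyRange_one_succ_right h]
  simp

lemma anSpec_succ (subs : List Int) (m : Int) (h : 0 ≤ m) :
    anSpec subs (m + 1) =
      anSpec subs m ++ [(m, PySem.List.pyRange (anS subs m) (anS subs m + anW subs m) 1)] := by
  unfold anSpec
  rw [PySem.List.pyRange_one_succ_right h]
  simp

lemma pyRange_two (c : Int) : PySem.List.pyRange c (c + 2) 1 = [c, c + 1] := by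
  rw [PySem.List.pyRange_one_cons (by omega), PySem.List.pyRange_one_cons (by omega),
    PySem.List.pyRange_one_eq_nil (by omega)]

lemma map_fst_anSpec (subs : List Int) (n : Int) :
    (anSpec subs n).map Prod.fst = PySem.List.pyRange 0 n 1 := by
  unfold anSpec; simp [Function.comp_def]

-- A's loop, characterised: after processing range(m) the dict holds anSpec and the counter anS
lemma A_fold (subs : List Int) (m : Nat) :
    (PySem.List.pyRange 0 (m : Int) 1).foldl
      (fun (st : PySem.Dict Int (List Int) × Int) i =>
        if i ∈ subs then (st.1.insert i [st.2], st.2 + 1)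
        else (st.1.insert i [st.2, st.2 + 1], st.2 + 2))
      (PySem.Dict.empty, 0)
    = (PySem.Dict.mk (anSpec subs m), anS subs m) := by
  induction m with
  | zero =>
    simp [anSpec, anS, PySem.Dict.empty]
  | succ m ih =>
    have hm : ((m : Int)) + 1 = ((m + 1 : Nat) : Int) := by push_cast; ring
    rw [← hm, PySem.List.pyRange_one_succ_right (by positivity : (0:Int) ≤ (m:Int)), List.foldl_append, ih]
    have hfresh : (PySem.Dict.mk (anSpec subs (m : Int))).contains (m : Int) = false := by
      rw [PySem.Dict.contains_eq_decide_mem_keys]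
      have : (PySem.Dict.mk (anSpec subs (m : Int))).keys = PySem.List.pyRange 0 (m : Int) 1 := by
        simpa [PySem.Dict.keys_mk] using map_fst_anSpec subs (m : Int)
      simp [this, PySem.List.mem_pyRange_one]
    have hins : ∀ v, (PySem.Dict.mk (anSpec subs (m : Int))).insert (m : Int) v
        = PySem.Dict.mk (anSpec subs (m : Int) ++ [((m : Int), v)]) := by
      intro v
      apply PySem.Dict.ext
      rw [PySem.Dict.items_insert_of_not_contains _ v hfresh]
    simp only [List.foldl_cons, List.foldl_nil]
    rw [← hm] at *
    by_cases hmem : (m : Int) ∈ subs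
    · simp only [hmem, if_pos, hins]
      rw [anSpec_succ subs (m : Int) (by positivity), anS_succ subs (m : Int) (by positivity)]
      have hw : anW subs (m : Int) = 1 := by simp [anW, hmem]
      rw [hw, PySem.List.pyRange_one_singleton]
    · simp only [hmem, if_false, hins]
      rw [anSpec_succ subs (m : Int) (by positivity), anS_succ subs (m : Int) (by positivity)]
      have hw : anW subs (m : Int) = 2 := by simp [anW, hmem]
      rw [hw, pyRange_two]

lemma A_eq_spec (n : Int) (subs : List Int) : assign_nights n subs = anSpec subs n := by
  unfold assign_nights
  by_cases hn : n ≤ 0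
  · rw [PySem.List.pyRange_one_eq_nil hn]
    simp [anSpec, PySem.List.pyRange_one_eq_nil hn, PySem.Dict.empty]
  · have : n = ((n.toNat : Nat) : Int) := by omega
    rw [this, A_fold]

-- B's offset loop builds exactly the prefix-sum list
lemma foldl_starts (ws : List Int) : ∀ (acc : List Int) (h : acc ≠ []),
    ws.foldl (fun a w => a ++ [PySem.List.pyGetD a (-1) 0 + w]) acc
      = acc.dropLast ++ prefixSums (acc.getLast h) ws := by
  induction ws with
  | nil =>
    intro acc h
    simp only [List.foldl_nil, prefixSums]
    exact (List.dropLast_append_getLast h).symm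
  | cons w ws ih =>
    intro acc h
    simp only [List.foldl_cons]
    rw [PySem.List.pyGetD_neg_one acc 0 h]
    have h' : acc ++ [acc.getLast h + w] ≠ [] := by simp
    rw [ih _ h']
    simp only [prefixSums, List.dropLast_concat, List.getLast_append_singleton]
    conv_rhs => rw [← List.singleton_append, ← List.append_assoc, List.dropLast_append_getLast h]

lemma getD_prefixSums (ws : List Int) : ∀ (s : Int) (k : Nat), k ≤ ws.length →
    (prefixSums s ws).getD k 0 = s + (ws.take k).sum := by
  induction ws with
  | nil =>
    intro s k hk
    simp only [List.length_nil, Nat.le_zero] at hk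
    subst hk
    simp [prefixSums]
  | cons w ws ih =>
    intro s k hk
    cases k with
    | zero => simp [prefixSums]
    | succ k =>
      simp only [prefixSums, List.getD_cons_succ, List.take_succ_cons, List.sum_cons]
      rw [ih (s + w) k (by simpa using hk)]
      ring

lemma B_eq_spec (n : Int) (subs : List Int) : assign_nights_alt n subs = anSpec subs n := by
  unfold assign_nights_alt anSpec
  apply List.map_congr_left
  intro i hi
  rw [PySem.List.mem_pyRange_one] at hi
  have hws : (PySem.List.pyRange 0 n 1).map (fun i => if i ∈ subs then (1 : Int) else 2)
      = (PySem.List.pyRange 0 n 1).map (anW subs) := by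
    simp [anW]
  rw [hws]
  set ws := (PySem.List.pyRange 0 n 1).map (anW subs) with hwsdef
  have hstart : ws.foldl (fun a w => a ++ [PySem.List.pyGetD a (-1) 0 + w]) [(0 : Int)]
      = prefixSums 0 ws := by
    rw [foldl_starts ws [(0 : Int)] (by simp)]; simp
  rw [hstart]
  have hlen : ws.length = n.toNat := by
    simp [hwsdef, PySem.List.length_pyRange_one]
  have hwidth : PySem.List.pyGetD ws i 0 = anW subs i := by
    exact PySem.List.pyGetD_map_pyRange_of_nonneg _ n i 0 hi.1 hi.2
  have hcast : i = ((i.toNat : Nat) : Int) := by omega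
  have hstartv : PySem.List.pyGetD (prefixSums 0 ws) i 0 = anS subs i := by
    rw [hcast, PySem.List.pyGetD_natCast, getD_prefixSums ws 0 i.toNat (by omega)]
    have hsplit : PySem.List.pyRange 0 n 1 = PySem.List.pyRange 0 i 1 ++ PySem.List.pyRange i n 1 :=
      PySem.List.pyRange_one_append 0 i n hi.1 (le_of_lt hi.2)
    have htake : ws.take i.toNat = (PySem.List.pyRange 0 i 1).map (anW subs) := by
      rw [hwsdef, hsplit, List.map_append]
      exact List.take_left' (by simp [PySem.List.length_pyRange_one])
    rw [htake]
    simp only [anS]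
    rw [← hcast, zero_add]
  rw [hwidth, hstartv]


-- ===== VERDICT (by name: the statement is the Claim_ definition above) =====
theorem assign_nights_spec : Claim_equal_assign_nights := by
  intro n subs _
  unfold Spec_assign_nights
  rw [A_eq_spec, B_eq_spec]
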